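-- pv_equiv track=rewrite | github.com/shree1892001/DocumenttExtractor | Services/DocumenProcessor2.py | _analyze_spacing
-- ===== SOURCE A (Python) =====
-- from typing import List, Dict, Any, Optional, Tuple
--
-- def _analyze_spacing(text: str) -> Dict[str, Any]:
--     """Analyze document spacing"""
--     spacing = {
--         'line_spacing': 0,
--         'paragraph_spacing': 0,
--         'section_spacing': 0
--     }
--
--     lines = text.split('\n')
--     empty_lines = 0
--     for line in lines:
--         if not line.strip():
--             empty_lines += 1
--         else:
--             if empty_lines == 1:
--                 spacing['paragraph_spacing'] += 1
--             elif empty_lines > 1: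
--                 spacing['section_spacing'] += 1
--             empty_lines = 0
--
--     return spacing
-- ===== SOURCE B (Python) =====
-- def _analyze_spacing(text: str):
--     """Stateless sliding-window rewrite: classify each blank line that is
--     immediately followed by a non-blank line by whether its predecessor is
--     blank (run length >= 2 -> section) or not (run length 1 -> paragraph)."""
--     blank = [not line.strip() for line in text.split('\n')]
--     para = 0
--     sec = 0
--     for prev, cur, nxt in zip([False] + blank, blank, blank[1:]):
--         if cur and not nxt:
--             if prev:
--                 sec += 1
--             else:
--                 para += 1
--     return {'line_spacing': 0, 'paragraph_spacing': para, 'section_spacing': sec}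
-- ===== Notes on version B (the rewrite author's own statement) =====
-- stated objective: alternative
-- what changed: Replaces A's stateful run-length counter (empty_lines accumulator reset on non-blank lines, dict mutated in the loop) by a stateless sliding window over (prev, cur, next) triples of line-blankness: a blank line followed by a non-blank line is a paragraph gap if its predecessor is non-blank, a section gap otherwise.
import Mathlib
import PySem

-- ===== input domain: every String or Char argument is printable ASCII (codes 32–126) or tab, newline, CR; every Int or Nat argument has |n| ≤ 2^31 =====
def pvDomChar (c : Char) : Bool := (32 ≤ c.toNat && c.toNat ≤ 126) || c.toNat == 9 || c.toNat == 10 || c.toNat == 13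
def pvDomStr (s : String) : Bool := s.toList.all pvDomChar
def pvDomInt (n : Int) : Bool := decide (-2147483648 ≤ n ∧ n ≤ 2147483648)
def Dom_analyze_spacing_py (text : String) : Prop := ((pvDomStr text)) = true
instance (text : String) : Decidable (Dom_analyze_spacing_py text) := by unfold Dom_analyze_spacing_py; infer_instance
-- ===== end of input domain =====

-- B replaces A's stateful blank-run counter with a stateless sliding window over
-- (prev, cur, next) blankness triples (objective: alternative decomposition, same cost).

-- ===== PORT A =====
-- the body of A's for-loop: state = (spacing dict, empty_lines)
def pvStepA (st : PySem.Dict String Int × Int) (line : String) : PySem.Dict String Int × Int :=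
  if PySem.Str.strip line = "" then (st.1, st.2 + 1)
  else
    ((if st.2 = 1 then PySem.Dict.modify st.1 "paragraph_spacing" 0 (· + 1)
      else if st.2 > 1 then PySem.Dict.modify st.1 "section_spacing" 0 (· + 1)
      else st.1), 0)

def analyze_spacing_py (text : String) : List (String × Int) :=
  let spacing : PySem.Dict String Int :=
    PySem.Dict.ofList [("line_spacing", 0), ("paragraph_spacing", 0), ("section_spacing", 0)]
  -- text.split("\n") with non-empty sep: exactly PySem.Chars.splitOn on code points
  let lines := (PySem.Chars.splitOn text.toList "\n".toList).map String.mk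
  ((lines.foldl pvStepA (spacing, 0)).1).items

-- ===== PORT B =====
-- the body of B's for-loop over (prev, cur, nxt) triples: state = (para, sec)
def pvStepB (ps : Int × Int) (t : Bool × Bool × Bool) : Int × Int :=
  if t.2.1 && !t.2.2 then (if t.1 then (ps.1, ps.2 + 1) else (ps.1 + 1, ps.2)) else ps

def analyze_spacing_py_alt (text : String) : List (String × Int) :=
  let blank := ((PySem.Chars.splitOn text.toList "\n".toList).map String.mk).map (fun line => decide (PySem.Str.strip line = ""))
  let ps := (List.zip (false :: blank) (List.zip blank blank.tail)).foldl pvStepB (0, 0)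
  [("line_spacing", 0), ("paragraph_spacing", ps.1), ("section_spacing", ps.2)]

-- ===== PRECONDITION & SPEC =====
def Spec_analyze_spacing_py (text : String) (out : List (String × Int)) : Prop := out = analyze_spacing_py_alt text
instance (text : String) (out : List (String × Int)) : Decidable (Spec_analyze_spacing_py text out) := by unfold Spec_analyze_spacing_py; infer_instance

-- ===== CLAIM (what is proved, stated in full; the proofs are below) =====
def Claim_equal_analyze_spacing_py : Prop := ∀ (text : String), Dom_analyze_spacing_py text → Spec_analyze_spacing_py text (analyze_spacing_py text)

-- ===== LEMMAS AND PROOFS =====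

-- (Δparagraph, Δsection) contributed by A's loop on blankness list bs from counter e
def pvRunA : List Bool → Int → Int × Int
  | [], _ => (0, 0)
  | b :: bs, e =>
    if b then pvRunA bs (e + 1)
    else
      let t := pvRunA bs 0
      (t.1 + (if e = 1 then 1 else 0), t.2 + (if e > 1 then 1 else 0))

-- A's final empty_lines counter
def pvRunE : List Bool → Int → Int
  | [], e => e
  | b :: bs, e => if b then pvRunE bs (e + 1) else pvRunE bs 0

-- (Δparagraph, Δsection) contributed by B's window scan with previous blankness prev
def pvW : Bool → List Bool → Int × Int
  | _, [] => (0, 0)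
  | _, [_] => (0, 0)
  | prev, b :: c :: rest =>
    let t := pvW b (c :: rest)
    if b && !c then (if prev then (t.1, t.2 + 1) else (t.1 + 1, t.2)) else t

-- the pending contribution of an unfinished blank run of length e at a split point
def pvK (e : Int) (bs : List Bool) : Int × Int :=
  match bs with
  | false :: _ => if e = 1 then (1, 0) else if e > 1 then (0, 1) else (0, 0)
  | _ => (0, 0)

def pvDS (p s : Int) : PySem.Dict String Int :=
  PySem.Dict.ofList [("line_spacing", 0), ("paragraph_spacing", p), ("section_spacing", s)]

theorem pvDS_mod_p (p s : Int) :
    PySem.Dict.modify (pvDS p s) "paragraph_spacing" 0 (· + 1) = pvDS (p + 1) s := by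
  simp [pvDS, PySem.Dict.modify, PySem.Dict.ofList, PySem.Dict.insert, PySem.Dict.getD,
    PySem.Dict.get?, PySem.Dict.contains, PySem.Dict.update, PySem.Dict.empty]

theorem pvDS_mod_s (p s : Int) :
    PySem.Dict.modify (pvDS p s) "section_spacing" 0 (· + 1) = pvDS p (s + 1) := by
  simp [pvDS, PySem.Dict.modify, PySem.Dict.ofList, PySem.Dict.insert, PySem.Dict.getD,
    PySem.Dict.get?, PySem.Dict.contains, PySem.Dict.update, PySem.Dict.empty]

theorem pvDS_congr {p p' s s' : Int} (hp : p = p') (hs : s = s') : pvDS p s = pvDS p' s' := by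
  rw [hp, hs]

theorem pvLemA (lines : List String) : ∀ (p s e : Int),
    lines.foldl pvStepA (pvDS p s, e)
      = (pvDS (p + (pvRunA (lines.map (fun l => decide (PySem.Str.strip l = ""))) e).1)
              (s + (pvRunA (lines.map (fun l => decide (PySem.Str.strip l = ""))) e).2),
         pvRunE (lines.map (fun l => decide (PySem.Str.strip l = ""))) e) := by
  induction lines with
  | nil => intro p s e; simp [pvRunA, pvRunE]
  | cons l ls ih =>
    intro p s e
    rw [List.map_cons, List.foldl_cons]
    by_cases hb : PySem.Str.strip l = ""
    · rw [show pvStepA (pvDS p s, e) l = (pvDS p s, e + 1) from by simp [pvStepA, hb], ih]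
      simp [pvRunA, pvRunE, hb]
    · rw [show pvStepA (pvDS p s, e) l =
          ((if e = 1 then pvDS (p + 1) s else if e > 1 then pvDS p (s + 1) else pvDS p s), 0) from by
            simp only [pvStepA, hb, if_false]
            split_ifs <;> simp [pvDS_mod_p, pvDS_mod_s]]
      have hd : (decide (PySem.Str.strip l = "")) = false := by simp [hb]
      rw [hd]
      split_ifs with h1 h2
      · rw [ih]; simp [pvRunA, pvRunE, h1]; exact pvDS_congr (by omega) (by omega)
      · rw [ih]; simp [pvRunA, pvRunE, h1, h2]; exact pvDS_congr (by omega) (by omega)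
      · rw [ih]; simp [pvRunA, pvRunE, h1, h2]

theorem pvLemB (bs : List Bool) : ∀ (prev : Bool) (p s : Int),
    (List.zip (prev :: bs) (List.zip bs bs.tail)).foldl pvStepB (p, s)
      = (p + (pvW prev bs).1, s + (pvW prev bs).2) := by
  induction bs with
  | nil => intro prev p s; simp [pvW]
  | cons b bs ih =>
    intro prev p s
    cases bs with
    | nil => simp [pvW]
    | cons c rest =>
      have := ih b
      simp only [List.tail_cons, List.zip_cons_cons, List.foldl_cons] at this ⊢
      rw [this]
      simp only [pvW, pvStepB]
      split_ifs <;> simp <;> omega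

theorem pvDS_items (p s : Int) :
    (pvDS p s).items = [("line_spacing", 0), ("paragraph_spacing", p), ("section_spacing", s)] := by
  simp [pvDS, PySem.Dict.ofList, PySem.Dict.items, PySem.Dict.update, PySem.Dict.empty,
    PySem.Dict.insert, PySem.Dict.contains, PySem.Dict.get?]

theorem pvLemAB (bs : List Bool) : ∀ (e : Int), 0 ≤ e →
    pvRunA bs e = ((pvW (decide (1 ≤ e)) bs).1 + (pvK e bs).1,
                   (pvW (decide (1 ≤ e)) bs).2 + (pvK e bs).2) := by
  induction bs with
  | nil => intro e _; simp [pvRunA, pvW, pvK]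
  | cons b bs ih =>
    intro e he
    cases b with
    | true =>
      have ht := ih (e + 1) (by omega)
      rw [show (decide ((1:Int) ≤ e + 1)) = true from by simp; omega] at ht
      simp [pvRunA] at ht ⊢
      rw [ht]
      cases bs with
      | nil => simp [pvW, pvK]
      | cons c rest =>
        cases c with
        | true => simp [pvW, pvK]
        | false =>
          by_cases h0 : (1:Int) ≤ e
          · rw [show (decide ((1:Int) ≤ e)) = true from by simp; omega]
            simp [pvW, pvK, Prod.ext_iff]
            constructor <;> split_ifs <;> omega
          · rw [show (decide ((1:Int) ≤ e)) = false from by simp; omega]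
            simp [pvW, pvK, Prod.ext_iff]
            constructor <;> split_ifs <;> omega
    | false =>
      have ht := ih 0 (le_refl 0)
      rw [show (decide ((1:Int) ≤ 0)) = false from by decide] at ht
      simp only [pvRunA, Bool.false_eq_true, if_false] at ht ⊢
      rw [ht]
      cases bs with
      | nil => simp [pvW, pvK, Prod.ext_iff]; constructor <;> split_ifs <;> omega
      | cons c rest =>
        cases c <;>
          · simp [pvW, pvK, Prod.ext_iff]
            constructor <;> split_ifs <;> omega

-- ===== VERDICT (by name: the statement is the Claim_ definition above) =====
theorem analyze_spacing_py_spec : Claim_equal_analyze_spacing_py := by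
  unfold Claim_equal_analyze_spacing_py
  intro text _
  unfold Spec_analyze_spacing_py analyze_spacing_py analyze_spacing_py_alt
  dsimp only
  rw [show (PySem.Dict.ofList [("line_spacing", (0:Int)), ("paragraph_spacing", 0), ("section_spacing", 0)]) = pvDS 0 0 from rfl]
  rw [pvLemA, pvLemB, pvDS_items]
  have hAB := pvLemAB ((((PySem.Chars.splitOn text.toList "\n".toList).map String.mk)).map (fun l => decide (PySem.Str.strip l = ""))) 0 (le_refl 0)
  rw [show (decide ((1:Int) ≤ 0)) = false from by decide] at hAB
  rw [hAB]
  have hk : ∀ (l : List Bool), pvK 0 l = (0, 0) := by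
    intro l; cases l with
    | nil => rfl
    | cons b bs => cases b <;> simp [pvK]
  rw [hk]
  simp
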